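-- pv_equiv track=rewrite | github.com/dileepkumar10/Gen-AI-Exchange-Hackathon | backend/ml_services/data_enrichment.py | _find_best_company_match
-- ===== SOURCE A (Python) =====
-- from typing import Dict, List, Optional, Tuple
--
-- def _find_best_company_match(entities: List[Dict], company_name: str, domain: str = None) -> Optional[Dict]:
--     """Find best matching company from search results"""
--     if not entities:
--         return None
--
--     best_match = None
--     best_score = 0
--
--     for entity in entities:
--         properties = entity.get('properties', {})
--         score = 0
--
--         # Name similarity
--         entity_name = properties.get('name', '').lower()
--         if entity_name == company_name.lower():
--             score += 10
--         elif company_name.lower() in entity_name or entity_name in company_name.lower():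
--             score += 5
--
--         # Domain match
--         if domain:
--             entity_website = properties.get('website', '').lower()
--             if domain.lower() in entity_website:
--                 score += 8
--
--         # Prefer active companies
--         if properties.get('status') == 'operating':
--             score += 2
--
--         if score > best_score:
--             best_score = score
--             best_match = entity
--
--     return best_match if best_score >= 5 else None
-- ===== SOURCE B (Python) =====
-- from typing import Dict, List, Optional
--
--
-- def _find_best_company_match(entities: List[Dict], company_name: str, domain: str = None) -> Optional[Dict]:
--     if not entities:
--         return None
--     target = company_name.lower()
--     # staged passes: one parallel score-component list per criterion
--     names = [e.get('properties', {}).get('name', '').lower() for e in entities]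
--     name_pts = [10 if n == target else 5 if (target in n or n in target) else 0 for n in names]
--     if domain:
--         d = domain.lower()
--         dom_pts = [8 if d in e.get('properties', {}).get('website', '').lower() else 0 for e in entities]
--     else:
--         dom_pts = [0] * len(entities)
--     status_pts = [2 if e.get('properties', {}).get('status') == 'operating' else 0 for e in entities]
--     scores = [a + b + c for a, b, c in zip(name_pts, dom_pts, status_pts)]
--     top = max(scores)
--     return entities[scores.index(top)] if top >= 5 else None
-- ===== Notes on version B (the rewrite author's own statement) =====
-- stated objective: alternative
-- what changed: A's single accumulator loop carrying (best_match, best_score) is replaced by staged passes: separate per-criterion score-component lists (name/domain/status) are built, zipped into a total-score list, and the result is selected positionally via entities[scores.index(max(scores))] with the >=5 gate; the staged comprehensions also hoist the per-entity lowercasing of company_name/domain out of the loop.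
import Mathlib
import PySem

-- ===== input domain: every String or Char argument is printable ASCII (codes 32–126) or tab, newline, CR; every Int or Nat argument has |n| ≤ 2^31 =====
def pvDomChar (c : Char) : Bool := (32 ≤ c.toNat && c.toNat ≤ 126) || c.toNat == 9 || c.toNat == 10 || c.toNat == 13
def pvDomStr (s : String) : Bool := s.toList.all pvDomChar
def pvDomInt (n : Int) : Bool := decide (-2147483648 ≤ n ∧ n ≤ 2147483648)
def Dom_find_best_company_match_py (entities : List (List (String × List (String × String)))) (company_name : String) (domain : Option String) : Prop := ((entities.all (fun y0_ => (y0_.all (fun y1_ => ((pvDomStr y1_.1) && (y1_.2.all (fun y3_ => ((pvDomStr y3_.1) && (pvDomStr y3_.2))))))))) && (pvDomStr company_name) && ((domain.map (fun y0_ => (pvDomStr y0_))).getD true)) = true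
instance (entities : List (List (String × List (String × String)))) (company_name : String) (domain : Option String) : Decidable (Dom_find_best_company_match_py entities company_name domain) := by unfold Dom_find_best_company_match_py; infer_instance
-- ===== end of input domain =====

-- B replaces A's single (best_match, best_score) accumulator loop by staged passes:
-- one score-component list per criterion, zipped into a total-score list, then
-- positional selection entities[scores.index(max(scores))] with the >=5 gate.

-- ===== PORT A =====
-- the body of A's for-loop (best_match/best_score accumulator step), transliterated
def stepA (company_name : String) (domain : Option String)
    (st : Option (List (String × List (String × String))) × Int)
    (entity : List (String × List (String × String))) :
    Option (List (String × List (String × String))) × Int :=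
  let properties := (PySem.Dict.mk entity).getD "properties" []
  let score : Int := 0
  let entity_name := PySem.Str.lower ((PySem.Dict.mk properties).getD "name" "")
  let score := if entity_name = PySem.Str.lower company_name then score + 10
    else if PySem.Str.isIn (PySem.Str.lower company_name) entity_name || PySem.Str.isIn entity_name (PySem.Str.lower company_name) then score + 5
    else score
  -- `if domain:` — None and the empty string are falsy
  let score := match domain with
    | none => score
    | some d =>
      if d = "" then score
      else if PySem.Str.isIn (PySem.Str.lower d) (PySem.Str.lower ((PySem.Dict.mk properties).getD "website" "")) then score + 8
      else score
  let score := if (PySem.Dict.mk properties).get? "status" = some "operating" then score + 2 else score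
  if st.2 < score then (some entity, score) else st

def find_best_company_match_py (entities : List (List (String × List (String × String)))) (company_name : String) (domain : Option String) : Option (List (String × List (String × String))) :=
  if entities = [] then none
  else
    let res := entities.foldl (stepA company_name domain) (none, 0)
    if 5 ≤ res.2 then res.1 else none

-- ===== PORT B =====
def find_best_company_match_py_alt (entities : List (List (String × List (String × String)))) (company_name : String) (domain : Option String) : Option (List (String × List (String × String))) :=
  if entities = [] then none
  else
    let target := PySem.Str.lower company_name
    let names := entities.map (fun e => PySem.Str.lower ((PySem.Dict.mk ((PySem.Dict.mk e).getD "properties" [])).getD "name" ""))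
    let name_pts : List Int := names.map (fun n => if n = target then 10 else if PySem.Str.isIn target n || PySem.Str.isIn n target then 5 else 0)
    -- `if domain:` — None and the empty string are falsy; `[0] * len(entities)` = replicate
    let dom_pts : List Int := match domain with
      | none => List.replicate entities.length 0
      | some d =>
        if d = "" then List.replicate entities.length 0
        else entities.map (fun e => if PySem.Str.isIn (PySem.Str.lower d) (PySem.Str.lower ((PySem.Dict.mk ((PySem.Dict.mk e).getD "properties" [])).getD "website" "")) then 8 else 0)
    let status_pts : List Int := entities.map (fun e => if (PySem.Dict.mk ((PySem.Dict.mk e).getD "properties" [])).get? "status" = some "operating" then 2 else 0)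
    -- `[a + b + c for a, b, c in zip(...)]` as two zipWith passes
    let scores := List.zipWith (fun a b => a + b) (List.zipWith (fun a b => a + b) name_pts dom_pts) status_pts
    match PySem.List.max? scores (fun v => v) with
    | none => none
    | some top =>
      if 5 ≤ top then
        match PySem.List.index? scores top with
        | none => none          -- unreachable: top ∈ scores
        | some i => PySem.List.pyGet? entities (i : Int)   -- entities[scores.index(top)]
      else none

-- ===== PRECONDITION & SPEC =====
def Spec_find_best_company_match_py (entities : List (List (String × List (String × String)))) (company_name : String) (domain : Option String) (out : Option (List (String × List (String × String)))) : Prop := out = find_best_company_match_py_alt entities company_name domain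
instance (entities : List (List (String × List (String × String)))) (company_name : String) (domain : Option String) (out : Option (List (String × List (String × String)))) : Decidable (Spec_find_best_company_match_py entities company_name domain out) := by unfold Spec_find_best_company_match_py; infer_instance

-- ===== CLAIM =====
def Claim_equal_find_best_company_match_py : Prop := ∀ (entities : List (List (String × List (String × String)))) (company_name : String) (domain : Option String), Dom_find_best_company_match_py entities company_name domain → Spec_find_best_company_match_py entities company_name domain (find_best_company_match_py entities company_name domain)

-- ===== LEMMAS AND PROOFS =====

-- proof-side per-entity score (A's sequential scoring of one entity)
def scoreE (company_name : String) (domain : Option String) (entity : List (String × List (String × String))) : Int :=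
  let props := (PySem.Dict.mk entity).getD "properties" []
  let target := PySem.Str.lower company_name
  let name := PySem.Str.lower ((PySem.Dict.mk props).getD "name" "")
  let score : Int :=
    if name = target then 10
    else if PySem.Str.isIn target name || PySem.Str.isIn name target then 5
    else 0
  let score := match domain with
    | none => score
    | some d =>
      if d ≠ "" ∧ PySem.Str.isIn (PySem.Str.lower d) (PySem.Str.lower ((PySem.Dict.mk props).getD "website" "")) then score + 8
      else score
  if (PySem.Dict.mk props).get? "status" = some "operating" then score + 2 else score

-- A's inline per-entity scoring computes exactly scoreE
theorem stepA_eq (company_name : String) (domain : Option String)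
    (st : Option (List (String × List (String × String))) × Int)
    (entity : List (String × List (String × String))) :
    stepA company_name domain st entity =
      if st.2 < scoreE company_name domain entity then (some entity, scoreE company_name domain entity) else st := by
  have hscore :
      (let properties := (PySem.Dict.mk entity).getD "properties" []
       let score : Int := 0
       let entity_name := PySem.Str.lower ((PySem.Dict.mk properties).getD "name" "")
       let score := if entity_name = PySem.Str.lower company_name then score + 10
         else if PySem.Str.isIn (PySem.Str.lower company_name) entity_name || PySem.Str.isIn entity_name (PySem.Str.lower company_name) then score + 5
         else score
       let score := match domain with
         | none => score
         | some d =>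
           if d = "" then score
           else if PySem.Str.isIn (PySem.Str.lower d) (PySem.Str.lower ((PySem.Dict.mk properties).getD "website" "")) then score + 8
           else score
       if (PySem.Dict.mk properties).get? "status" = some "operating" then score + 2 else score) =
      scoreE company_name domain entity := by
    cases domain with
    | none => simp only [scoreE]; split_ifs <;> simp
    | some d =>
      simp only [scoreE]
      by_cases hd : d = "" <;> split_ifs <;> simp_all
  simp only [stepA]
  rw [hscore]

theorem scoreE_nonneg (company_name : String) (domain : Option String) (entity : List (String × List (String × String))) :
    0 ≤ scoreE company_name domain entity := by
  cases domain <;> simp only [scoreE] <;> split_ifs <;> simp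

-- B's three staged score components, named (proof-side)
def nPtsF (company_name : String) (e : List (String × List (String × String))) : Int :=
  if PySem.Str.lower ((PySem.Dict.mk ((PySem.Dict.mk e).getD "properties" [])).getD "name" "") = PySem.Str.lower company_name then 10
  else if PySem.Str.isIn (PySem.Str.lower company_name) (PySem.Str.lower ((PySem.Dict.mk ((PySem.Dict.mk e).getD "properties" [])).getD "name" "")) || PySem.Str.isIn (PySem.Str.lower ((PySem.Dict.mk ((PySem.Dict.mk e).getD "properties" [])).getD "name" "")) (PySem.Str.lower company_name) then 5
  else 0

def dPtsF (domain : Option String) (e : List (String × List (String × String))) : Int :=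
  match domain with
  | none => 0
  | some d =>
    if d = "" then 0
    else if PySem.Str.isIn (PySem.Str.lower d) (PySem.Str.lower ((PySem.Dict.mk ((PySem.Dict.mk e).getD "properties" [])).getD "website" "")) then 8 else 0

def sPtsF (e : List (String × List (String × String))) : Int :=
  if (PySem.Dict.mk ((PySem.Dict.mk e).getD "properties" [])).get? "status" = some "operating" then 2 else 0

-- the three staged components sum pointwise to scoreE
theorem components_eq (company_name : String) (domain : Option String) (e : List (String × List (String × String))) :
    nPtsF company_name e + dPtsF domain e + sPtsF e = scoreE company_name domain e := by
  cases domain with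
  | none => simp only [nPtsF, dPtsF, sPtsF, scoreE]; split_ifs <;> simp
  | some d =>
    simp only [nPtsF, dPtsF, sPtsF, scoreE]
    by_cases hd : d = "" <;> split_ifs <;> simp_all

-- zip of three mapped component lists is the map of the pointwise sum
theorem zip3_map {E : Type} (f g h : E → Int) (l : List E) :
    List.zipWith (fun a b => a + b) (List.zipWith (fun a b => a + b) (l.map f) (l.map g)) (l.map h)
      = l.map (fun e => f e + g e + h e) := by
  induction l with
  | nil => simp
  | cons x t _ => simp

theorem replicate_eq_map {E : Type} (l : List E) :
    List.replicate l.length (0 : Int) = l.map (fun _ => 0) := by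
  induction l with
  | nil => simp
  | cons x t ih => rw [List.length_cons, List.replicate_succ, List.map_cons, ih]

-- the first-argmax accumulator step (proof-side glue between the two lemmas below)
def famaxStep {E : Type} (f : E → Int) (acc : Option E) (e : E) : Option E :=
  match acc with
  | none => some e
  | some m => if f m < f e then some e else some m

theorem famaxStep_some {E : Type} (f : E → Int) (m e : E) :
    famaxStep f (some m) e = if f m < f e then some e else some m := rfl

-- first-argmax fold: it returns some b where f b is the running max and b is the
-- FIRST element attaining it (characterised via find?)
theorem famax_spec {E : Type} (f : E → Int) (t : List E) (x : E) :
    ∃ b, t.foldl (famaxStep f) (some x) = some b ∧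
      f b = (t.map f).foldl max (f x) ∧
      (x :: t).find? (fun e => f e == (t.map f).foldl max (f x)) = some b := by
  induction t generalizing x with
  | nil => exact ⟨x, rfl, rfl, by simp⟩
  | cons e t ih =>
    simp only [List.foldl_cons, List.map_cons, famaxStep_some]
    by_cases hc : f x < f e
    · obtain ⟨b, hfold, hfb, hfind⟩ := ih e
      have hmax : max (f x) (f e) = f e := max_eq_right (le_of_lt hc)
      refine ⟨b, by rw [if_pos hc]; exact hfold, by rw [hmax]; exact hfb, ?_⟩
      have hle : f e ≤ (t.map f).foldl max (f e) := (PySem.List.le_foldl_max (t.map f) (f e)).1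
      rw [hmax]
      have hne : (f x == (t.map f).foldl max (f e)) = false := by
        simp only [beq_eq_false_iff_ne, ne_eq]; omega
      simp only [List.find?_cons, hne]
      exact hfind
    · obtain ⟨b, hfold, hfb, hfind⟩ := ih x
      have hle : f e ≤ f x := not_lt.mp hc
      have hmax : max (f x) (f e) = f x := max_eq_left hle
      refine ⟨b, by rw [if_neg hc]; exact hfold, by rw [hmax]; exact hfb, ?_⟩
      rw [hmax]
      have hxle : f x ≤ (t.map f).foldl max (f x) := (PySem.List.le_foldl_max (t.map f) (f x)).1
      by_cases hx : f x = (t.map f).foldl max (f x)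
      · have hxT : (f x == (t.map f).foldl max (f x)) = true := beq_iff_eq.mpr hx
        simp only [List.find?_cons, hxT] at hfind ⊢
        exact hfind
      · have hxlt : f x < (t.map f).foldl max (f x) := lt_of_le_of_ne hxle hx
        have hnx : (f x == (t.map f).foldl max (f x)) = false := by
          simp only [beq_eq_false_iff_ne, ne_eq]; exact hx
        have hne : (f e == (t.map f).foldl max (f x)) = false := by
          simp only [beq_eq_false_iff_ne, ne_eq]; omega
        simp only [List.find?_cons, hnx] at hfind
        simp only [List.find?_cons, hnx, hne]
        exact hfind

-- scores.index(top) then entities[i] recovers exactly the first element with score top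
theorem index_get {E : Type} (f : E → Int) (l : List E) (m : Int) (b : E)
    (h : l.find? (fun e => f e == m) = some b) :
    ∃ i : Nat, PySem.List.index? (l.map f) m = some i ∧
      PySem.List.pyGet? l (i : Int) = some b := by
  induction l with
  | nil => simp at h
  | cons x t ih =>
    by_cases hx : f x = m
    · have hb : b = x := by
        have hxT : (f x == m) = true := beq_iff_eq.mpr hx
        simp only [List.find?_cons, hxT] at h
        exact (Option.some_inj.mp h).symm
      refine ⟨0, ?_, by rw [hb]; exact PySem.List.pyGet?_zero_cons x t⟩
      rw [List.map_cons, hx]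
      exact PySem.List.index?_cons_self _ _
    · have hxF : (f x == m) = false := by simp only [beq_eq_false_iff_ne, ne_eq]; exact hx
      simp only [List.find?_cons, hxF] at h
      obtain ⟨i, hidx, hget⟩ := ih h
      refine ⟨i + 1, ?_, ?_⟩
      · rw [List.map_cons, PySem.List.index?_cons_of_ne _ hx, hidx]; rfl
      · have : ((i + 1 : Nat) : Int) = (i : Int) + 1 := by push_cast; ring
        rw [this, PySem.List.pyGet?_cons_succ]
        exact hget

-- loop invariant: A's (best_match, best_score) accumulator vs the running first-argmax fold
theorem loop_inv {E : Type} (f : E → Int)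
    (t : List E) (b : E) (bm : Option E) (bs : Int)
    (h : (bm = some b ∧ bs = f b ∧ 0 < bs) ∨ (bm = none ∧ bs = 0 ∧ f b = 0)) :
    ∃ b', t.foldl (famaxStep f) (some b) = some b' ∧
      (((t.foldl (fun st e => if st.2 < f e then (some e, f e) else st) (bm, bs)).1 = some b' ∧
        (t.foldl (fun st e => if st.2 < f e then (some e, f e) else st) (bm, bs)).2 = f b' ∧ 0 < f b') ∨
       ((t.foldl (fun st e => if st.2 < f e then (some e, f e) else st) (bm, bs)).1 = none ∧
        (t.foldl (fun st e => if st.2 < f e then (some e, f e) else st) (bm, bs)).2 = 0 ∧ f b' = 0)) := by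
  induction t generalizing b bm bs with
  | nil =>
    exact ⟨b, rfl, by rcases h with ⟨h1, h2, h3⟩ | ⟨h1, h2, h3⟩ <;> simp_all⟩
  | cons x t ih =>
    simp only [List.foldl_cons, famaxStep_some]
    rcases h with ⟨h1, h2, h3⟩ | ⟨h1, h2, h3⟩
    · subst h1 h2
      by_cases hc : f b < f x
      · simp only [hc, if_true]
        exact ih x (some x) (f x) (Or.inl ⟨rfl, rfl, lt_trans h3 hc⟩)
      · simp only [hc, if_false]
        exact ih b (some b) (f b) (Or.inl ⟨rfl, rfl, h3⟩)
    · subst h1 h2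
      rw [h3]
      by_cases hc : (0 : Int) < f x
      · simp only [hc, if_true]
        exact ih x (some x) (f x) (Or.inl ⟨rfl, rfl, hc⟩)
      · simp only [hc, if_false]
        exact ih b none 0 (Or.inr ⟨rfl, rfl, h3⟩)

-- B's staged score-component lists zip to the map of the per-entity score
theorem scores_eq (company_name : String) (domain : Option String)
    (l : List (List (String × List (String × String)))) :
    List.zipWith (fun a b => a + b)
      (List.zipWith (fun a b => a + b)
        ((l.map (fun e => PySem.Str.lower ((PySem.Dict.mk ((PySem.Dict.mk e).getD "properties" [])).getD "name" ""))).map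
          (fun n => if n = PySem.Str.lower company_name then (10 : Int) else if PySem.Str.isIn (PySem.Str.lower company_name) n || PySem.Str.isIn n (PySem.Str.lower company_name) then 5 else 0))
        (match domain with
         | none => List.replicate l.length 0
         | some d =>
           if d = "" then List.replicate l.length 0
           else l.map (fun e => if PySem.Str.isIn (PySem.Str.lower d) (PySem.Str.lower ((PySem.Dict.mk ((PySem.Dict.mk e).getD "properties" [])).getD "website" "")) then 8 else 0)))
      (l.map (fun e => if (PySem.Dict.mk ((PySem.Dict.mk e).getD "properties" [])).get? "status" = some "operating" then (2 : Int) else 0))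
    = l.map (scoreE company_name domain) := by
  have hname : ((fun n => if n = PySem.Str.lower company_name then (10 : Int) else if PySem.Str.isIn (PySem.Str.lower company_name) n || PySem.Str.isIn n (PySem.Str.lower company_name) then 5 else 0) ∘
      (fun e => PySem.Str.lower ((PySem.Dict.mk ((PySem.Dict.mk e).getD "properties" [])).getD "name" ""))) = nPtsF company_name := rfl
  have hsts : (fun e => if (PySem.Dict.mk ((PySem.Dict.mk e).getD "properties" [])).get? "status" = some "operating" then (2 : Int) else 0) = sPtsF := rfl
  cases domain with
  | none =>
    rw [List.map_map, hname, hsts, replicate_eq_map l,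
      show (fun (_ : List (String × List (String × String))) => (0 : Int)) = dPtsF none from rfl, zip3_map]
    exact List.map_congr_left (fun e _ => components_eq company_name none e)
  | some d =>
    dsimp only
    by_cases hd : d = ""
    · subst hd
      rw [if_pos rfl, List.map_map, hname, hsts, replicate_eq_map l,
        show (fun (_ : List (String × List (String × String))) => (0 : Int)) = dPtsF (some "") from funext fun e => by simp [dPtsF], zip3_map]
      exact List.map_congr_left (fun e _ => components_eq company_name (some "") e)
    · rw [if_neg hd, List.map_map, hname, hsts,
        show (fun e => if PySem.Str.isIn (PySem.Str.lower d) (PySem.Str.lower ((PySem.Dict.mk ((PySem.Dict.mk e).getD "properties" [])).getD "website" "")) then (8 : Int) else 0) = dPtsF (some d) from funext fun e => by simp [dPtsF, hd], zip3_map]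
      exact List.map_congr_left (fun e _ => components_eq company_name (some d) e)

-- core: A's accumulator loop equals B's positional selection from any scores list
-- that is the map of the per-entity score
theorem core (company_name : String) (domain : Option String)
    (x : List (String × List (String × String))) (t : List (List (String × List (String × String))))
    (scores : List Int) (hs : scores = (x :: t).map (scoreE company_name domain)) :
    (if 5 ≤ ((x :: t).foldl (stepA company_name domain) (none, 0)).2
     then ((x :: t).foldl (stepA company_name domain) (none, 0)).1 else none)
    = (match PySem.List.max? scores (fun v => v) with
       | none => none
       | some top =>
         if 5 ≤ top then
           match PySem.List.index? scores top with
           | none => none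
           | some i => PySem.List.pyGet? (x :: t) (i : Int)
         else none) := by
  subst hs
  have hstep : stepA company_name domain =
      (fun st e => if st.2 < scoreE company_name domain e then (some e, scoreE company_name domain e) else st) :=
    funext fun st => funext fun e => stepA_eq company_name domain st e
  simp only [List.foldl_cons, hstep]
  obtain ⟨b, hfold, hfb, hfind⟩ := famax_spec (scoreE company_name domain) t x
  have hBmax : PySem.List.max? ((x :: t).map (scoreE company_name domain)) (fun v => v) =
      some ((t.map (scoreE company_name domain)).foldl max (scoreE company_name domain x)) := by
    rw [List.map_cons]; exact PySem.List.max?_id_cons _ _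
  obtain ⟨i, hidx, hget⟩ := index_get (scoreE company_name domain) (x :: t)
    ((t.map (scoreE company_name domain)).foldl max (scoreE company_name domain x)) b hfind
  rw [hBmax]
  simp only [hidx]
  by_cases h0 : (0 : Int) < scoreE company_name domain x
  · rw [if_pos h0]
    obtain ⟨b', hb', hcase⟩ := loop_inv (scoreE company_name domain) t x (some x) (scoreE company_name domain x) (Or.inl ⟨rfl, rfl, h0⟩)
    have hbb : b = b' := by rw [hfold] at hb'; exact Option.some_inj.mp hb'
    subst hbb
    rcases hcase with ⟨e1, e2, _⟩ | ⟨e1, e2, e3⟩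
    · rw [e1, e2, hfb]
      by_cases h5 : (5 : Int) ≤ (t.map (scoreE company_name domain)).foldl max (scoreE company_name domain x)
      · rw [if_pos h5, if_pos h5, hget]
      · rw [if_neg h5, if_neg h5]
    · rw [e1, e2, ← hfb, e3]
      norm_num
  · have hz : scoreE company_name domain x = 0 := le_antisymm (not_lt.mp h0) (scoreE_nonneg company_name domain x)
    rw [if_neg h0]
    obtain ⟨b', hb', hcase⟩ := loop_inv (scoreE company_name domain) t x none 0 (Or.inr ⟨rfl, rfl, hz⟩)
    have hbb : b = b' := by rw [hfold] at hb'; exact Option.some_inj.mp hb'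
    subst hbb
    rcases hcase with ⟨e1, e2, _⟩ | ⟨e1, e2, e3⟩
    · rw [e1, e2, hfb]
      by_cases h5 : (5 : Int) ≤ (t.map (scoreE company_name domain)).foldl max (scoreE company_name domain x)
      · rw [if_pos h5, if_pos h5, hget]
      · rw [if_neg h5, if_neg h5]
    · rw [e1, e2, ← hfb, e3]
      norm_num

-- ===== VERDICT =====
theorem find_best_company_match_py_spec : Claim_equal_find_best_company_match_py := by
  intro entities company_name domain _
  unfold Spec_find_best_company_match_py
  unfold find_best_company_match_py find_best_company_match_py_alt
  cases entities with
  | nil => simp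
  | cons x t =>
    simp only [reduceCtorEq, if_false]
    exact core company_name domain x t _ (scores_eq company_name domain (x :: t))
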